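-- pv_equiv track=rewrite | github.com/L-Schlosser/AIS_SPR_4 | edge_model/extraction/postprocess.py | bio_tags_to_fields
-- ===== SOURCE A (Python) =====
-- def bio_tags_to_fields(tokens: list[str], tags: list[str]) -> dict[str, str]:
--     """Merge B-/I- tagged tokens into field values.
--
--     Args:
--         tokens: List of text tokens (may include ## subword prefixes).
--         tags: List of BIO tags aligned with tokens.
--
--     Returns:
--         Dict mapping field_name (lowercase) to concatenated value string.
--         For duplicate fields, the first occurrence is kept.
--     """
--     if len(tokens) != len(tags):
--         raise ValueError(f"Token/tag length mismatch: {len(tokens)} tokens vs {len(tags)} tags")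
--
--     fields: dict[str, list[str]] = {}
--     current_field: str | None = None
--
--     for token, tag in zip(tokens, tags):
--         clean_token = _clean_subword(token)
--
--         if tag.startswith("B-"):
--             field_name = tag[2:].lower()
--             if field_name not in fields:
--                 fields[field_name] = []
--                 current_field = field_name
--             else:
--                 # Duplicate B- tag for same field — keep first occurrence
--                 current_field = None
--         elif tag.startswith("I-") and current_field is not None:
--             field_name = tag[2:].lower()
--             if field_name == current_field:
--                 fields[current_field].append(clean_token)
--             else:
--                 current_field = None
--         else:
--             current_field = None
--
--         if tag.startswith("B-"):
--             field_name = tag[2:].lower()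
--             if len(fields.get(field_name, [])) == 0:
--                 fields[field_name] = [clean_token]
--
--     return {k: " ".join(v).strip() for k, v in fields.items() if v}
--
-- def _clean_subword(token: str) -> str:
--     """Remove ## subword prefix from tokenizer artifacts."""
--     if token.startswith("##"):
--         return token[2:]
--     return token
-- ===== SOURCE B (Python) =====
-- def bio_tags_to_fields(tokens: list[str], tags: list[str]) -> dict[str, str]:
--     """Merge B-/I- tagged tokens into field values (span-list decomposition)."""
--     if len(tokens) != len(tags):
--         raise ValueError(f"Token/tag length mismatch: {len(tokens)} tokens vs {len(tags)} tags")
--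
--     # Pass 1: collect contiguous spans as (field_name, [cleaned tokens]).
--     spans: list[tuple[str, list[str]]] = []
--     open_span = None
--     for token, tag in zip(tokens, tags):
--         clean = token[2:] if token.startswith("##") else token
--         if tag.startswith("B-"):
--             open_span = (tag[2:].lower(), [clean])
--             spans.append(open_span)
--         elif tag.startswith("I-") and open_span is not None and tag[2:].lower() == open_span[0]:
--             open_span[1].append(clean)
--         else:
--             open_span = None
--
--     # Pass 2: first occurrence of each field wins.
--     result: dict[str, str] = {}
--     for field, toks in spans:
--         if field not in result:
--             result[field] = " ".join(toks).strip()
--     return result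
-- ===== Notes on version B (the rewrite author's own statement) =====
-- stated objective: simpler
-- what changed: B replaces A's mutable dict-of-token-lists with the tracked current_field and A's duplicated B- branch (insert-empty-then-patch second if) by a two-pass decomposition: one scan groups tokens into contiguous (field, tokens) spans, then a fold keeps the first span per field and formats it.
import Mathlib
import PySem

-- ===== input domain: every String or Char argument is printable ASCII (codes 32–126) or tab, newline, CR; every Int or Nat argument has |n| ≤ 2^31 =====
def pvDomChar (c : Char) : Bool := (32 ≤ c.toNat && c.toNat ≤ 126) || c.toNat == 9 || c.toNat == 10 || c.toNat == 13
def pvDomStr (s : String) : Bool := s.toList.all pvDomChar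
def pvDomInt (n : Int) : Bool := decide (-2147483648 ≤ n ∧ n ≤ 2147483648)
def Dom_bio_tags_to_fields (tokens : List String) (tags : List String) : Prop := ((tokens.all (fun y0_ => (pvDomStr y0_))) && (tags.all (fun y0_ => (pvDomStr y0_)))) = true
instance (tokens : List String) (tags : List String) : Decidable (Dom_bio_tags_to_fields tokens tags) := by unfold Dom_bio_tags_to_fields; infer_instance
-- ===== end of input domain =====

-- B merges BIO spans by a two-pass span-list decomposition instead of A's dict-of-lists with a
-- current_field tracker; same return value, proved equal on inputs of equal length (A raises otherwise).

-- ===== PORT A =====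
def clean_subword (token : String) : String :=
  if PySem.Str.startswith token "##" then PySem.Str.slice token (some 2) none else token

-- one iteration of A's for-loop; state = (fields dict, current_field)
def pvAStep (st : PySem.Dict String (List String) × Option String) (p : String × String) :
    PySem.Dict String (List String) × Option String :=
  let clean := clean_subword p.1
  let tag := p.2
  let st1 :=
    if PySem.Str.startswith tag "B-" then
      let fn := PySem.Str.lower (PySem.Str.slice tag (some 2) none)
      if (st.1.contains fn) = false then (st.1.insert fn [], some fn)
      else (st.1, none)
    else if PySem.Str.startswith tag "I-" && st.2.isSome then
      let fn := PySem.Str.lower (PySem.Str.slice tag (some 2) none)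
      if st.2 = some fn then (st.1.modify fn [] (· ++ [clean]), st.2)
      else (st.1, none)
    else (st.1, none)
  if PySem.Str.startswith tag "B-" then
    let fn := PySem.Str.lower (PySem.Str.slice tag (some 2) none)
    if (st1.1.getD fn []).length = 0 then (st1.1.insert fn [clean], st1.2) else st1
  else st1

def bio_tags_to_fields (tokens : List String) (tags : List String) : List (String × String) :=
  let fin := (List.zip tokens tags).foldl pvAStep (PySem.Dict.empty, none)
  ((fin.1.items.filter (fun kv => !kv.2.isEmpty)).map
    (fun kv => (kv.1, PySem.Str.strip (PySem.Str.join " " kv.2))))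

-- ===== PORT B =====
-- one iteration of B's first pass; state = (collected spans, reversed; open span)
def pvBStep (st : List (String × List String) × Option (String × List String)) (p : String × String) :
    List (String × List String) × Option (String × List String) :=
  let clean := if PySem.Str.startswith p.1 "##" then PySem.Str.slice p.1 (some 2) none else p.1
  let tag := p.2
  if PySem.Str.startswith tag "B-" then
    ((match st.2 with | some sp => sp :: st.1 | none => st.1),
     some (PySem.Str.lower (PySem.Str.slice tag (some 2) none), [clean]))
  else
    match st.2 with
    | some sp =>
      if PySem.Str.startswith tag "I-" && (PySem.Str.lower (PySem.Str.slice tag (some 2) none) == sp.1) then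
        (st.1, some (sp.1, sp.2 ++ [clean]))
      else (sp :: st.1, none)
    | none => (st.1, none)

def bio_tags_to_fields_alt (tokens : List String) (tags : List String) : List (String × String) :=
  let fin := (List.zip tokens tags).foldl pvBStep ([], none)
  let spans := (match fin.2 with | some sp => sp :: fin.1 | none => fin.1).reverse
  (spans.foldl (fun (d : PySem.Dict String String) sp =>
      if d.contains sp.1 then d
      else d.insert sp.1 (PySem.Str.strip (PySem.Str.join " " sp.2)))
    PySem.Dict.empty).items

-- ===== PRECONDITION & SPEC =====
-- Pre_ excludes exactly the inputs of unequal length, on which Python A raises ValueError.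
def Pre_bio_tags_to_fields (tokens : List String) (tags : List String) : Prop :=
  tokens.length = tags.length
instance (tokens : List String) (tags : List String) : Decidable (Pre_bio_tags_to_fields tokens tags) := by unfold Pre_bio_tags_to_fields; infer_instance

def pvWitness_bio_tags_to_fields : List String × List String :=
  (["##John", "Smith", "x"], ["B-Name", "I-Name", "O"])

def Spec_bio_tags_to_fields (tokens : List String) (tags : List String) (out : List (String × String)) : Prop := out = bio_tags_to_fields_alt tokens tags
instance (tokens : List String) (tags : List String) (out : List (String × String)) : Decidable (Spec_bio_tags_to_fields tokens tags out) := by unfold Spec_bio_tags_to_fields; infer_instance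

-- ===== CLAIM (what is proved, stated in full; the proofs are below) =====
def Claim_equal_bio_tags_to_fields : Prop := ∀ (tokens : List String) (tags : List String), Dom_bio_tags_to_fields tokens tags → Pre_bio_tags_to_fields tokens tags → Spec_bio_tags_to_fields tokens tags (bio_tags_to_fields tokens tags)

-- ===== LEMMAS AND PROOFS =====

-- the spans collected so far, in order (closed ones are stored reversed; the open one is last)
def pvFull (st : List (String × List String) × Option (String × List String)) :
    List (String × List String) :=
  st.1.reverse ++ st.2.toList

-- first-occurrence-wins fold of a span list into a dict (values still token lists)
def pvFW (l : List (String × List String)) : PySem.Dict String (List String) :=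
  l.foldl (fun d sp => if d.contains sp.1 then d else d.insert sp.1 sp.2) PySem.Dict.empty

-- A's current_field, recovered from B's state
def pvCur (st : List (String × List String) × Option (String × List String)) : Option String :=
  match st.2 with
  | some sp => if st.1.any (fun q => q.1 == sp.1) then none else some sp.1
  | none => none

def pvAbs (st : List (String × List String) × Option (String × List String)) :
    PySem.Dict String (List String) × Option String :=
  (pvFW (pvFull st), pvCur st)

def pvInv (st : List (String × List String) × Option (String × List String)) : Prop :=
  ∀ sp ∈ pvFull st, sp.2 ≠ []

theorem pvFW_append_singleton (l : List (String × List String)) (sp : String × List String) :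
    pvFW (l ++ [sp]) = if (pvFW l).contains sp.1 then pvFW l else (pvFW l).insert sp.1 sp.2 := by
  simp [pvFW, List.foldl_append]

theorem pvFW_contains_aux (l : List (String × List String))
    (d : PySem.Dict String (List String)) (k : String) :
    (l.foldl (fun d sp => if d.contains sp.1 then d else d.insert sp.1 sp.2) d).contains k
      = (d.contains k || l.any (fun sp => sp.1 == k)) := by
  induction l generalizing d with
  | nil => simp
  | cons sp t ih =>
    simp only [List.foldl_cons, List.any_cons]
    by_cases hc : d.contains sp.1
    · rw [if_pos hc, ih]
      by_cases hk : sp.1 = k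
      · subst hk; simp [hc]
      · simp [beq_eq_false_iff_ne.mpr hk]
    · rw [if_neg hc, ih, PySem.Dict.contains_insert]
      by_cases hk : sp.1 = k
      · subst hk; simp
      · simp [beq_eq_false_iff_ne.mpr hk, beq_eq_false_iff_ne.mpr (Ne.symm hk)]

theorem pvFW_contains (l : List (String × List String)) (k : String) :
    (pvFW l).contains k = l.any (fun sp => sp.1 == k) := by
  rw [pvFW, pvFW_contains_aux]; simp

theorem pvFW_mem_aux (l : List (String × List String)) (d : PySem.Dict String (List String))
    (kv : String × List String)
    (h : kv ∈ (l.foldl (fun d sp => if d.contains sp.1 then d else d.insert sp.1 sp.2) d).items) :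
    kv ∈ d.items ∨ kv ∈ l := by
  induction l generalizing d with
  | nil => exact Or.inl h
  | cons sp t ih =>
    simp only [List.foldl_cons] at h
    by_cases hc : d.contains sp.1
    · rw [if_pos hc] at h
      rcases ih _ h with h' | h'
      · exact Or.inl h'
      · exact Or.inr (List.mem_cons_of_mem _ h')
    · rw [if_neg hc] at h
      rcases ih _ h with h' | h'
      · rw [PySem.Dict.items_insert_of_not_contains _ _ (by simpa using hc)] at h'
        rcases List.mem_append.mp h' with h'' | h''
        · exact Or.inl h''
        · simp at h''; exact Or.inr (by simp [h''])
      · exact Or.inr (List.mem_cons_of_mem _ h')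

theorem pvFW_mem (l : List (String × List String)) (kv : String × List String)
    (h : kv ∈ (pvFW l).items) : kv ∈ l := by
  rcases pvFW_mem_aux l PySem.Dict.empty kv h with h' | h'
  · simp [PySem.Dict.empty] at h'
  · exact h'

theorem pvFW_getD_ne_nil (l : List (String × List String)) (k : String)
    (hne : ∀ sp ∈ l, sp.2 ≠ []) (hc : (pvFW l).contains k = true) :
    (pvFW l).getD k [] ≠ [] := by
  have hsome : ((pvFW l).get? k).isSome := by
    rw [← PySem.Dict.contains_eq_isSome_get?]; exact hc
  rcases Option.isSome_iff_exists.mp hsome with ⟨v, hv⟩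
  rw [PySem.Dict.getD_of_get?_eq_some _ _ hv]
  exact hne (k, v) (pvFW_mem _ _ (PySem.Dict.mem_items_of_get?_eq_some _ hv))

-- value-map commutes with the first-wins fold (B's second pass vs pvFW)
theorem pvFW_map_aux (g : List String → String) (l : List (String × List String))
    (d1 : PySem.Dict String (List String)) (d2 : PySem.Dict String String)
    (h : d2.items = d1.items.map (fun kv => (kv.1, g kv.2))) :
    (l.foldl (fun d sp => if d.contains sp.1 then d else d.insert sp.1 (g sp.2)) d2).items
      = (l.foldl (fun d sp => if d.contains sp.1 then d else d.insert sp.1 sp.2) d1).items.map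
          (fun kv => (kv.1, g kv.2)) := by
  induction l generalizing d1 d2 with
  | nil => simpa using h
  | cons sp t ih =>
    have hcont : d2.contains sp.1 = d1.contains sp.1 := by
      simp [PySem.Dict.contains, h, List.any_map, Function.comp_def]
    simp only [List.foldl_cons]
    by_cases hc : d1.contains sp.1
    · rw [hcont, if_pos hc, if_pos hc]; exact ih _ _ h
    · rw [hcont, if_neg hc, if_neg hc]
      refine ih _ _ ?_
      rw [PySem.Dict.items_insert_of_not_contains _ _ (by rw [hcont]; simpa using hc),
          PySem.Dict.items_insert_of_not_contains _ _ (by simpa using hc)]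
      simp [h]

-- the "B-" iteration, as seen through pvAbs (cur is ignored by A's B- branch)
theorem pvStep_B (p : String × String) (hB : PySem.Str.startswith p.2 "B-" = true)
    (rev2 : List (String × List String)) (cur : Option String)
    (hInv2 : ∀ sp ∈ rev2.reverse, sp.2 ≠ []) :
    pvAbs (rev2, some (PySem.Str.lower (PySem.Str.slice p.2 (some 2) none), [clean_subword p.1]))
      = pvAStep (pvFW rev2.reverse, cur) p := by
  have hB' : PySem.Chars.startswith p.2.toList ['B', '-'] = true := by simpa using hB
  have hfull : pvFull (rev2, some (PySem.Str.lower (PySem.Str.slice p.2 (some 2) none), [clean_subword p.1]))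
      = rev2.reverse ++ [(PySem.Str.lower (PySem.Str.slice p.2 (some 2) none), [clean_subword p.1])] := by
    simp [pvFull]
  have hcur : pvCur (rev2, some (PySem.Str.lower (PySem.Str.slice p.2 (some 2) none), [clean_subword p.1]))
      = if rev2.any (fun q => q.1 == PySem.Str.lower (PySem.Str.slice p.2 (some 2) none)) then none
        else some (PySem.Str.lower (PySem.Str.slice p.2 (some 2) none)) := by
    simp [pvCur]
  have habs : pvAbs (rev2, some (PySem.Str.lower (PySem.Str.slice p.2 (some 2) none), [clean_subword p.1]))
      = (pvFW (pvFull (rev2, some (PySem.Str.lower (PySem.Str.slice p.2 (some 2) none), [clean_subword p.1]))),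
         pvCur (rev2, some (PySem.Str.lower (PySem.Str.slice p.2 (some 2) none), [clean_subword p.1]))) := rfl
  have hcrel : (pvFW rev2.reverse).contains (PySem.Str.lower (PySem.Str.slice p.2 (some 2) none)) = rev2.any (fun q => q.1 == PySem.Str.lower (PySem.Str.slice p.2 (some 2) none)) := by
    rw [pvFW_contains, List.any_reverse]
  rw [habs, hfull, pvFW_append_singleton, hcur, hcrel]
  by_cases hc : rev2.any (fun q => q.1 == PySem.Str.lower (PySem.Str.slice p.2 (some 2) none))
  · have hcont : (pvFW rev2.reverse).contains (PySem.Str.lower (PySem.Str.slice p.2 (some 2) none)) = true := by rw [hcrel]; exact hc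
    have hne : (pvFW rev2.reverse).getD (PySem.Str.lower (PySem.Str.slice p.2 (some 2) none)) [] ≠ [] :=
      pvFW_getD_ne_nil _ _ hInv2 hcont
    simp [pvAStep, hB', hc, hcont, List.length_eq_zero_iff, hne]
  · have hcont : (pvFW rev2.reverse).contains (PySem.Str.lower (PySem.Str.slice p.2 (some 2) none)) = false := by
      rw [hcrel]; exact Bool.eq_false_iff.mpr hc
    simp [pvAStep, hB', hc, hcont, PySem.Dict.getD_insert_self, PySem.Dict.insert_insert_self]

-- ONE loop iteration: B's step, seen through pvAbs, is A's step
theorem pvStep_sim (st : List (String × List String) × Option (String × List String))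
    (p : String × String) (hInv : pvInv st) :
    pvAbs (pvBStep st p) = pvAStep (pvAbs st) p ∧ pvInv (pvBStep st p) := by
  obtain ⟨rev, op⟩ := st
  have hInv' : ∀ sp ∈ pvFull (rev, op), sp.2 ≠ [] := hInv
  cases op with
  | none =>
    have hF : pvFull (rev, (none : Option (String × List String))) = rev.reverse := by
      simp [pvFull]
    have hInv2 : ∀ sp ∈ rev.reverse, sp.2 ≠ [] := by rw [← hF]; exact hInv'
    by_cases hB : PySem.Str.startswith p.2 "B-"
    · have hB' : PySem.Chars.startswith p.2.toList ['B', '-'] = true := by simpa using hB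
      have hbs : pvBStep (rev, none) p = (rev, some (PySem.Str.lower (PySem.Str.slice p.2 (some 2) none), [clean_subword p.1])) := by
        simp [pvBStep, clean_subword, hB']
      have habs0 : pvAbs (rev, (none : Option (String × List String)))
          = (pvFW rev.reverse, none) := by
        simp [pvAbs, pvCur, hF]
      refine ⟨?_, ?_⟩
      · rw [hbs, habs0]
        exact pvStep_B p hB rev none hInv2
      · rw [hbs]
        intro sp hsp
        have : pvFull (rev, some (PySem.Str.lower (PySem.Str.slice p.2 (some 2) none), [clean_subword p.1])) = rev.reverse ++ [(PySem.Str.lower (PySem.Str.slice p.2 (some 2) none), [clean_subword p.1])] := by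
          simp [pvFull]
        rw [this] at hsp
        rcases List.mem_append.mp hsp with h | h
        · exact hInv2 sp h
        · simp at h; simp [h]
    · have hB'' : PySem.Chars.startswith p.2.toList ['B', '-'] = false := by
        simpa using Bool.eq_false_iff.mpr hB
      have hbs : pvBStep (rev, none) p = (rev, none) := by
        simp [pvBStep, hB'']
      rw [hbs]
      refine ⟨?_, hInv⟩
      have habs0 : pvAbs (rev, (none : Option (String × List String)))
          = (pvFW rev.reverse, none) := by
        simp [pvAbs, pvCur, hF]
      rw [habs0]
      have hB' : ¬ PySem.Chars.startswith p.2.toList ['B', '-'] = true := by simpa using hB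
      simp [pvAStep, hB']
  | some sp0 =>
    obtain ⟨f, ts⟩ := sp0
    have hL : pvFull (rev, some (f, ts)) = ((f, ts) :: rev).reverse := by
      simp [pvFull]
    have hInv2 : ∀ sp ∈ ((f, ts) :: rev).reverse, sp.2 ≠ [] := by rw [← hL]; exact hInv'
    have habs0 : pvAbs (rev, some (f, ts))
        = (pvFW (((f, ts) :: rev).reverse),
           if rev.any (fun q => q.1 == f) then none else some f) := by
      simp [pvAbs, pvCur, hL]
    by_cases hB : PySem.Str.startswith p.2 "B-"
    · have hB' : PySem.Chars.startswith p.2.toList ['B', '-'] = true := by simpa using hB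
      have hbs : pvBStep (rev, some (f, ts)) p
          = ((f, ts) :: rev, some (PySem.Str.lower (PySem.Str.slice p.2 (some 2) none), [clean_subword p.1])) := by
        simp [pvBStep, clean_subword, hB']
      refine ⟨?_, ?_⟩
      · rw [hbs, habs0]
        exact pvStep_B p hB ((f, ts) :: rev) _ hInv2
      · rw [hbs]
        intro sp hsp
        have : pvFull ((f, ts) :: rev, some (PySem.Str.lower (PySem.Str.slice p.2 (some 2) none), [clean_subword p.1]))
            = ((f, ts) :: rev).reverse ++ [(PySem.Str.lower (PySem.Str.slice p.2 (some 2) none), [clean_subword p.1])] := by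
          simp [pvFull]
        rw [this] at hsp
        rcases List.mem_append.mp hsp with h | h
        · exact hInv2 sp h
        · simp at h; simp [h]
    · by_cases hcond : (PySem.Str.startswith p.2 "I-" && (PySem.Str.lower (PySem.Str.slice p.2 (some 2) none) == f)) = true
      · -- matching I- tag: extend the open span
        have hand := hcond
        rw [Bool.and_eq_true] at hand
        obtain ⟨hI, hfe⟩ := hand
        have hfeq : PySem.Str.lower (PySem.Str.slice p.2 (some 2) none) = f := eq_of_beq hfe
        have hB' : ¬ PySem.Chars.startswith p.2.toList ['B', '-'] = true := by simpa using hB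
        have hI' : PySem.Chars.startswith p.2.toList ['I', '-'] = true := by simpa using hI
        have hbs : pvBStep (rev, some (f, ts)) p = (rev, some (f, ts ++ [clean_subword p.1])) := by
          simp [pvBStep, clean_subword, hB', hI', hfeq]
        rw [hbs]
        have hL' : pvFull (rev, some (f, ts ++ [clean_subword p.1])) = rev.reverse ++ [(f, ts ++ [clean_subword p.1])] := by
          simp [pvFull]
        constructor
        · have habs : pvAbs (rev, some (f, ts ++ [clean_subword p.1]))
              = (pvFW (rev.reverse ++ [(f, ts ++ [clean_subword p.1])]),
                 if rev.any (fun q => q.1 == f) then none else some f) := by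
            simp [pvAbs, pvCur, hL']
          have hLrev : ((f, ts) :: rev).reverse = rev.reverse ++ [(f, ts)] := by simp
          rw [habs, habs0, hLrev, pvFW_append_singleton, pvFW_append_singleton]
          have hcrev : (pvFW rev.reverse).contains f = rev.any (fun q => q.1 == f) := by
            rw [pvFW_contains, List.any_reverse]
          dsimp only
          rw [hcrev]
          by_cases hdup : rev.any (fun q => q.1 == f)
          · rw [if_pos hdup]
            simp [pvAStep, hB', hdup]
          · rw [if_neg hdup]
            have h1 : ((pvFW rev.reverse).insert f ts).getD f [] = ts :=
              PySem.Dict.getD_insert_self _ _ _ _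
            simp [pvAStep, hB', hI', hfeq, hdup, PySem.Dict.modify, h1,
                  PySem.Dict.insert_insert_self]
        · intro sp hsp
          rw [hL'] at hsp
          rcases List.mem_append.mp hsp with h | h
          · exact hInv2 sp (by rw [List.reverse_cons]; exact List.mem_append.mpr (Or.inl h))
          · simp at h; simp [h]
      · -- close the open span
        have hB' : ¬ PySem.Chars.startswith p.2.toList ['B', '-'] = true := by simpa using hB
        have hcond' : ¬ (PySem.Chars.startswith p.2.toList ['I', '-'] = true
            ∧ PySem.Str.lower (PySem.Str.slice p.2 (some 2) none) = f) := by
          simpa using hcond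
        have hbs : pvBStep (rev, some (f, ts)) p = ((f, ts) :: rev, none) := by
          simp [pvBStep, hB', hcond']
        rw [hbs]
        have hLc : pvFull ((f, ts) :: rev, (none : Option (String × List String)))
            = ((f, ts) :: rev).reverse := by
          simp [pvFull]
        constructor
        · have habs : pvAbs ((f, ts) :: rev, (none : Option (String × List String)))
              = (pvFW (((f, ts) :: rev).reverse), none) := by
            simp [pvAbs, pvCur, hLc]
          rw [habs, habs0]
          by_cases hdup : rev.any (fun q => q.1 == f)
          · rw [if_pos hdup]
            simp [pvAStep, hB']
          · rw [if_neg hdup]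
            by_cases hI : PySem.Str.startswith p.2 "I-"
            · have hfne : (PySem.Str.lower (PySem.Str.slice p.2 (some 2) none) == f) = false := by
                rcases Bool.eq_false_or_eq_true (PySem.Str.lower (PySem.Str.slice p.2 (some 2) none) == f) with h | h
                · exact absurd (by rw [hI, h]; rfl) hcond
                · exact h
              have hfne' : f ≠ PySem.Str.lower (PySem.Str.slice p.2 (some 2) none) := fun h => by simp [h] at hfne
              have hI' : PySem.Chars.startswith p.2.toList ['I', '-'] = true := by simpa using hI
              simp [pvAStep, hB', hI', hfne']
            · have hI' : ¬ PySem.Chars.startswith p.2.toList ['I', '-'] = true := by simpa using hI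
              simp [pvAStep, hB', hI']
        · intro sp hsp
          rw [hLc] at hsp
          exact hInv2 sp hsp

theorem pvFold_sim (l : List (String × String))
    (st : List (String × List String) × Option (String × List String)) (hInv : pvInv st) :
    pvAbs (l.foldl pvBStep st) = l.foldl pvAStep (pvAbs st) ∧ pvInv (l.foldl pvBStep st) := by
  induction l generalizing st with
  | nil => exact ⟨rfl, hInv⟩
  | cons p t ih =>
    rcases pvStep_sim st p hInv with ⟨h1, h2⟩
    rcases ih (pvBStep st p) h2 with ⟨h3, h4⟩
    exact ⟨by simp only [List.foldl_cons, h3, h1], h4⟩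

-- helper facts for the simulation
theorem pvMain (l : List (String × String)) :
    (((l.foldl pvAStep (PySem.Dict.empty, none)).1.items.filter (fun kv => !kv.2.isEmpty)).map
      (fun kv => (kv.1, PySem.Str.strip (PySem.Str.join " " kv.2))))
    = ((match (l.foldl pvBStep ([], none)).2 with
          | some sp => sp :: (l.foldl pvBStep ([], none)).1
          | none => (l.foldl pvBStep ([], none)).1).reverse.foldl
        (fun (d : PySem.Dict String String) (sp : String × List String) =>
          if d.contains sp.1 then d
          else d.insert sp.1 (PySem.Str.strip (PySem.Str.join " " sp.2)))
        PySem.Dict.empty).items := by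
  have h0 : pvInv ([], none) := by intro sp hsp; simp [pvFull] at hsp
  rcases pvFold_sim l ([], none) h0 with ⟨hA, hI⟩
  set F := l.foldl pvBStep ([], none) with hF
  have e0 : (l.foldl pvAStep (PySem.Dict.empty, none)) = pvAbs F := by
    rw [hA]; rfl
  rw [e0]
  have hspans : ((match F.2 with | some sp => sp :: F.1 | none => F.1).reverse)
      = pvFull F := by
    cases h : F.2 <;> simp [pvFull, h]
  rw [hspans]
  have hfst : (pvAbs F).1 = pvFW (pvFull F) := rfl
  rw [hfst]
  have hfil : ((pvFW (pvFull F)).items.filter (fun kv => !kv.2.isEmpty))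
      = (pvFW (pvFull F)).items := by
    apply List.filter_eq_self.mpr
    intro kv hkv
    simpa using hI kv (pvFW_mem _ _ hkv)
  rw [hfil]
  simp only [pvFW]
  exact (pvFW_map_aux (fun v => PySem.Str.strip (PySem.Str.join " " v)) (pvFull F) PySem.Dict.empty PySem.Dict.empty (by simp [PySem.Dict.empty])).symm

-- ===== VERDICT (by name: the statement is the Claim_ definition above) =====
theorem bio_tags_to_fields_spec : Claim_equal_bio_tags_to_fields := by
  intro tokens tags _ _
  exact pvMain (List.zip tokens tags)
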